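-- pv_equiv track=rewrite | github.com/jvalansi/hackerrank | picking_numbers.py | helper
-- ===== SOURCE A (Python) =====
-- def helper(a):
--     if len(a)==1:
--         return [a]
--     longests = helper(a[:-1])
--     longests = sorted(longests, key=lambda x: len(x), reverse=True)
--     new_longests = []
--     attached = False
--     for longest in longests:
--         diff = abs(longest[-1]-a[-1])
--         if diff==0:
--             new_longests.append(longest+[a[-1]])
--             attached = True
--             continue
--         if diff==1:
--             new_longests.append(longest+[a[-1]])
--             attached = True
--         new_longests.append(longest)
--     if not attached:
--         new_longests.append([a[-1]])
--     return new_longests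
-- ===== SOURCE B (Python) =====
-- def helper(a):
--     longests = [[a[0]]]
--     for x in a[1:]:
--         longests.sort(key=len, reverse=True)
--         new_longests = [m for l in longests
--                         for m in ([l + [x]] if abs(l[-1] - x) == 0
--                                   else [l + [x], l] if abs(l[-1] - x) == 1
--                                   else [l])]
--         if all(abs(l[-1] - x) > 1 for l in longests):
--             new_longests.append([x])
--         longests = new_longests
--     return longests
-- ===== Notes on version B (the rewrite author's own statement) =====
-- stated objective: simpler
-- what changed: Replaces A's recursion over a[:-1] by a single forward loop whose step rebuilds the family with one flat comprehension and an all() check instead of A's accumulator loop with a continue/attached flag.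
-- outside the precondition, e.g. on helper([]): A raises RecursionError, B raises IndexError
import Mathlib
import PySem

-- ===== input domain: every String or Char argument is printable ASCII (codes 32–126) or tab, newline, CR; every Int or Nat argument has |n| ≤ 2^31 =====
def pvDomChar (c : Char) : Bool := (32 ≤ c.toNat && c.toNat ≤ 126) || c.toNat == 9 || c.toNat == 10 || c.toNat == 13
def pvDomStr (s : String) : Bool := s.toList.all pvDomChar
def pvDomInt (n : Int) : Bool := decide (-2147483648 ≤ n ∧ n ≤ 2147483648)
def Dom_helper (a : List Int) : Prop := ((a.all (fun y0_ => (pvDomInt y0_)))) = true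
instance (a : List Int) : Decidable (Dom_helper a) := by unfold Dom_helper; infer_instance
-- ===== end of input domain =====

-- B replaces A's recursion over a[:-1] (re-sorting and rescanning at every level) by a single
-- forward loop whose step builds the new family as one flatMap/comprehension; objective: simpler.

-- ===== PORT A =====
-- transliteration of A; the recursion is on a[:-1] (PySem.List.slice a none (some (-1))).
-- On a = [] Python recurses forever (RecursionError); that input is outside Pre_helper, the
-- port returns [] there only to be total.  longest[-1] is pyGet? longest (-1); every member of
-- the accumulated family is nonempty so the .getD 0 default is never used (exact on Pre_).
def helper (a : List Int) : List (List Int) :=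
  if a.length = 1 then [a]
  else if a.length = 0 then []   -- Python diverges here; outside Pre_helper
  else
    let longests := helper (PySem.List.slice a none (some (-1)))
    let longests := PySem.List.sorted longests (fun s => s.length) true
    let st := longests.foldl (fun (st : List (List Int) × Bool) longest =>
      let diff := ((PySem.List.pyGet? longest (-1)).getD 0 - (PySem.List.pyGet? a (-1)).getD 0).natAbs
      if diff = 0 then (st.1 ++ [longest ++ [(PySem.List.pyGet? a (-1)).getD 0]], true)
      else if diff = 1 then (st.1 ++ [longest ++ [(PySem.List.pyGet? a (-1)).getD 0], longest], true)
      else (st.1 ++ [longest], st.2)) ([], false)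
    if st.2 then st.1 else st.1 ++ [[(PySem.List.pyGet? a (-1)).getD 0]]
termination_by a.length
decreasing_by simp [PySem.List.slice_to_neg_one]; omega

-- ===== PORT B =====
-- one iteration of Source B's loop body: sort by length descending (stable), rebuild by comprehension
def helper_step (ls : List (List Int)) (x : Int) : List (List Int) :=
  let s := PySem.List.sorted ls (fun t => t.length) true
  let new := s.flatMap (fun l =>
    let d := ((PySem.List.pyGet? l (-1)).getD 0 - x).natAbs
    if d = 0 then [l ++ [x]] else if d = 1 then [l ++ [x], l] else [l])
  if s.all (fun l => decide (1 < ((PySem.List.pyGet? l (-1)).getD 0 - x).natAbs)) then new ++ [[x]]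
  else new

def helper_alt (a : List Int) : List (List Int) :=
  match a with
  | [] => []            -- Python Source B raises IndexError on a[0]; outside Pre_helper
  | h :: t => t.foldl helper_step [[h]]   -- for x in a[1:]

-- ===== PRECONDITION & SPEC =====
-- Pre_ excludes only a = [], where A hits Python's recursion limit (RecursionError) and B raises IndexError.
def Pre_helper (a : List Int) : Prop := a ≠ []
instance (a : List Int) : Decidable (Pre_helper a) := by unfold Pre_helper; infer_instance
def pvWitness_helper : List Int := ([1, 2, 2, 4])
def Spec_helper (a : List Int) (out : List (List Int)) : Prop := out = helper_alt a
instance (a : List Int) (out : List (List Int)) : Decidable (Spec_helper a out) := by unfold Spec_helper; infer_instance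

-- ===== CLAIM (what is proved, stated in full; the proofs are below) =====
def Claim_equal_helper : Prop := ∀ (a : List Int), Dom_helper a → Pre_helper a → Spec_helper a (helper a)

-- ===== LEMMAS AND PROOFS =====

-- A's accumulator loop over s equals acc ++ flatMap chunk, with the flag OR-ed with "any attaches"
theorem helper_loopA (x : Int) (s : List (List Int)) :
    ∀ (acc : List (List Int)) (b : Bool),
    s.foldl (fun (st : List (List Int) × Bool) longest =>
      let diff := ((PySem.List.pyGet? longest (-1)).getD 0 - x).natAbs
      if diff = 0 then (st.1 ++ [longest ++ [x]], true)
      else if diff = 1 then (st.1 ++ [longest ++ [x], longest], true)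
      else (st.1 ++ [longest], st.2)) (acc, b)
    = (acc ++ s.flatMap (fun l =>
        let d := ((PySem.List.pyGet? l (-1)).getD 0 - x).natAbs
        if d = 0 then [l ++ [x]] else if d = 1 then [l ++ [x], l] else [l]),
       b || s.any (fun l => !decide (1 < ((PySem.List.pyGet? l (-1)).getD 0 - x).natAbs))) := by
  induction s with
  | nil => simp
  | cons l t ih =>
    intro acc b
    simp only [List.foldl_cons, List.flatMap_cons, List.any_cons]
    by_cases h0 : ((PySem.List.pyGet? l (-1)).getD 0 - x).natAbs = 0
    · simp only [if_pos h0]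
      rw [ih]
      simp [h0]
    · by_cases h1 : ((PySem.List.pyGet? l (-1)).getD 0 - x).natAbs = 1
      · simp only [if_neg h0, if_pos h1]
        rw [ih]
        simp [h1]
      · have hgt : 1 < ((PySem.List.pyGet? l (-1)).getD 0 - x).natAbs := by omega
        simp only [if_neg h0, if_neg h1]
        rw [ih]
        simp [hgt]

theorem helper_append (l : List Int) (x : Int) (hl : l ≠ []) :
    helper (l ++ [x]) = helper_step (helper l) x := by
  rw [helper]
  have hlen : (l ++ [x]).length = l.length + 1 := by simp
  have h1 : ¬ (l ++ [x]).length = 1 := by simpa [hlen] using hl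
  have h0 : ¬ (l ++ [x]).length = 0 := by simp [hlen]
  rw [if_neg h1, if_neg h0]
  have hsl : PySem.List.slice (l ++ [x]) none (some (-1)) = l := by
    rw [PySem.List.slice_to_neg_one]; simp
  have hlast : (PySem.List.pyGet? (l ++ [x]) (-1)).getD 0 = x := by
    rw [PySem.List.pyGet?_neg_one_append_singleton]; rfl
  simp only [hsl, hlast, helper_step, helper_loopA, Bool.false_or, List.nil_append]
  rw [List.all_eq_not_any_not]
  cases hb : (PySem.List.sorted (helper l) (fun s => s.length) true).any
      (fun y => !decide (1 < ((PySem.List.pyGet? y (-1)).getD 0 - x).natAbs)) <;>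
    simp_all

theorem helper_eq_alt (a : List Int) (ha : a ≠ []) : helper a = helper_alt a := by
  induction a using List.reverseRecOn with
  | nil => exact absurd rfl ha
  | append_singleton l x ih =>
    rcases eq_or_ne l [] with rfl | hl
    · simp [helper, helper_alt]
    · rw [helper_append l x hl, ih hl]
      obtain ⟨h, t, rfl⟩ := List.exists_cons_of_ne_nil hl
      simp [helper_alt]

-- ===== VERDICT (by name: the statement is the Claim_ definition above) =====
theorem helper_spec : Claim_equal_helper := by
  intro a _ hpre
  unfold Spec_helper
  exact helper_eq_alt a hpre
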